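-- pv_equiv track=rewrite | github.com/saidniyr1943/CTI-110 | master_final_review_completed_with_test2_labs_and_practice.py | dupWords
-- ===== SOURCE A (Python) =====
-- def dupWords(words):
--     """Return a sorted list of words that occur more than one time in a tuple."""
--     result = []
--     for word in words:
--         count = 0
--         for other in words:
--             if word == other:
--                 count += 1
--         if count > 1 and word not in result:
--             result.append(word)
--     result.sort()
--     return result
-- ===== SOURCE B (Python) =====
-- def dupWords(words):
--     """Return a sorted list of words that occur more than one time in a tuple."""
--     counts = {}
--     for w in words:
--         counts[w] = counts.get(w, 0) + 1
--     return sorted(w for w, c in counts.items() if c > 1)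
-- ===== Notes on version B (the rewrite author's own statement) =====
-- stated objective: faster
-- what changed: Replaces the nested counting loop plus membership-deduplication and final sort with a single counting-dict pass followed by filtering the dict's keys and sorting them.
import Mathlib
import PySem

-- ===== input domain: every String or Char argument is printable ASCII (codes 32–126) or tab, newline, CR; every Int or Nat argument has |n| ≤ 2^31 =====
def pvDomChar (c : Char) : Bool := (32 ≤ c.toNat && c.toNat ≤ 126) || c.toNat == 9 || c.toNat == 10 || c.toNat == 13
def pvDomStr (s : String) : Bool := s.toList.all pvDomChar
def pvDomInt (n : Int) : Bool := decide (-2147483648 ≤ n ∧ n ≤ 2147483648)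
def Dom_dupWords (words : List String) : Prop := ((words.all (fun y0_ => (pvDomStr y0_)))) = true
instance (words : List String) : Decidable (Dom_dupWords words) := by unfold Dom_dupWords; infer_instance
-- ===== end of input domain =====

-- B replaces A's quadratic nested-count loop and list-membership dedup by one counting-dict pass,
-- then filters and sorts the dict's keys (measured faster at the largest test size).


-- ===== PORT A =====
def dupWords (words : List String) : List String :=
  let result := words.foldl (fun result word =>
    let count := words.foldl (fun count other => if word == other then count + 1 else count) (0 : Int)
    if decide (1 < count) && !result.contains word then result ++ [word] else result) []
  PySem.List.sorted result (fun x => x) false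

-- ===== PORT B =====
def dupWords_alt (words : List String) : List String :=
  let counts : PySem.Dict String Int :=
    words.foldl (fun d w => d.insert w (d.getD w 0 + 1)) PySem.Dict.empty
  PySem.List.sorted ((counts.items.filter (fun p => decide (1 < p.2))).map Prod.fst) (fun x => x) false

-- ===== PRECONDITION & SPEC =====
def Spec_dupWords (words : List String) (out : List String) : Prop := out = dupWords_alt words
instance (words : List String) (out : List String) : Decidable (Spec_dupWords words out) := by unfold Spec_dupWords; infer_instance

-- ===== CLAIM (what is proved, stated in full; the proofs are below) =====
def Claim_equal_dupWords : Prop := ∀ (words : List String), Dom_dupWords words → Spec_dupWords words (dupWords words)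

-- ===== LEMMAS AND PROOFS =====

-- inner counting loop of A = list count
lemma count_loop (w : String) (xs : List String) (c0 : Int) :
    xs.foldl (fun count other => if w == other then count + 1 else count) c0
      = c0 + (xs.count w : Int) := by
  induction xs generalizing c0 with
  | nil => simp
  | cons x xs ih =>
    rw [List.foldl_cons, ih]
    by_cases h : w = x
    · subst h; simp; ring
    · have hb : (w == x) = false := by simpa using h
      have hc : (x == w) = false := by simpa using Ne.symm h
      simp [hb, hc, List.count_cons]

-- accumulating only p-satisfying unseen words = filtering p from the running Python set
lemma filtered_dedup (p : String → Bool) (xs : List String) : ∀ (seen : List String),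
    xs.foldl (fun res w => if p w && !res.contains w then res ++ [w] else res) (seen.filter p)
      = (xs.foldl (fun s w => PySem.Set.add s w) seen).filter p := by
  induction xs with
  | nil => intro seen; rfl
  | cons x xs ih =>
    intro seen
    rw [List.foldl_cons, List.foldl_cons]
    by_cases hm : x ∈ seen
    · have hadd : PySem.Set.add seen x = seen := by
        simp [PySem.Set.add, hm]
      by_cases hp : p x = true
      · have h1 : (p x && !(seen.filter p).contains x) = false := by
          simp [List.mem_filter, hm, hp]
        rw [h1, hadd]
        simpa using ih seen
      · have h1 : (p x && !(seen.filter p).contains x) = false := by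
          simp [hp]
        rw [h1, hadd]
        simpa using ih seen
    · have hadd : PySem.Set.add seen x = seen ++ [x] := by
        simp [PySem.Set.add, hm]
      by_cases hp : p x = true
      · have h1 : (p x && !(seen.filter p).contains x) = true := by
          simp [List.mem_filter, hm, hp]
        have h2 : seen.filter p ++ [x] = (seen ++ [x]).filter p := by
          simp [List.filter_append, hp]
        rw [h1, hadd]
        simpa [h2] using ih (seen ++ [x])
      · have hpF : p x = false := by simpa using hp
        have h1 : (p x && !(seen.filter p).contains x) = false := by
          simp [hpF]
        have h2 : seen.filter p = (seen ++ [x]).filter p := by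
          simp [List.filter_append, hpF]
        rw [h1, hadd, h2]
        simpa using ih (seen ++ [x])

lemma filtered_dedup_nil (p : String → Bool) (xs : List String) :
    xs.foldl (fun res w => if p w && !res.contains w then res ++ [w] else res) []
      = (PySem.Set.ofList xs).filter p := by
  have h := filtered_dedup p xs []
  rw [List.filter_nil] at h
  rw [h, PySem.Set.ofList_eq_foldl]

lemma pre_sort_eq (words : List String) :
    words.foldl (fun result word =>
      let count := words.foldl (fun count other => if word == other then count + 1 else count) (0 : Int)
      if decide (1 < count) && !result.contains word then result ++ [word] else result) []
      = (PySem.Set.ofList words).filter (fun w => decide (1 < (words.count w : Int))) := by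
  have hstep : (fun (result : List String) (word : String) =>
      let count := words.foldl (fun count other => if word == other then count + 1 else count) (0 : Int)
      if decide (1 < count) && !result.contains word then result ++ [word] else result)
      = (fun res w => if (fun w => decide (1 < (words.count w : Int))) w && !res.contains w
          then res ++ [w] else res) := by
    funext res w
    simp only [count_loop, zero_add]
  rw [hstep, filtered_dedup_nil]

lemma filter_snd_map (c : String → Int) (l : List String) :
    ((l.map (fun k => (k, c k))).filter (fun p => decide (1 < p.2))).map Prod.fst
      = l.filter (fun k => decide (1 < c k)) := by
  induction l with
  | nil => rfl
  | cons x xs ih => by_cases h : (1 : Int) < c x <;> simp [h, ih]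

-- ===== VERDICT (by name: the statement is the Claim_ definition above) =====
theorem dupWords_spec : Claim_equal_dupWords := by
  intro words _
  show dupWords words = dupWords_alt words
  simp only [dupWords, dupWords_alt]
  rw [PySem.Dict.foldl_insert_getD_add_one_eq_counter, PySem.Dict.items_counter,
    filter_snd_map, pre_sort_eq]
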